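-- pv_equiv track=rewrite | github.com/pypi-data/pypi-mirror-168 | packages/kalifast/kalifast-0.1.66.tar.gz/kalifast-0.1.66/kalifast.py | marginError
-- ===== SOURCE A (Python) =====
-- def marginError(positions, margin):
--     if (len(positions) == 1):
--         return positions
--     res = []
--     lenInit = len(positions)
--     i = 0
--
--     while i < lenInit:
--         pos = positions[0]
--         res.append(pos)
--         positions.remove(pos)
--         i = i + 1
--         j = 0
--         while j < len(positions) :
--             posRemove = positions[j]
--             if pos[0] + margin >= posRemove[0] and pos[1] + margin >= posRemove[1] :
--                 positions.remove(posRemove)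
--                 i = i + 1
--
--             else :
--                 j = j + 1
--     return res
-- ===== SOURCE B (Python) =====
-- def marginError(positions, margin):
--     if len(positions) == 1:
--         return positions
--     res = []
--     for pos in list(positions):
--         if not any(r[0] + margin >= pos[0] and r[1] + margin >= pos[1] for r in res):
--             res.append(pos)
--     positions[:] = []
--     return res
-- ===== Notes on version B (the rewrite author's own statement) =====
-- stated objective: simpler
-- what changed: Replaces A's nested while loops that repeatedly pop the front and rescan/remove covered points from the mutated input with a single forward pass that keeps a point only if no already-kept representative covers it.
import Mathlib
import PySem

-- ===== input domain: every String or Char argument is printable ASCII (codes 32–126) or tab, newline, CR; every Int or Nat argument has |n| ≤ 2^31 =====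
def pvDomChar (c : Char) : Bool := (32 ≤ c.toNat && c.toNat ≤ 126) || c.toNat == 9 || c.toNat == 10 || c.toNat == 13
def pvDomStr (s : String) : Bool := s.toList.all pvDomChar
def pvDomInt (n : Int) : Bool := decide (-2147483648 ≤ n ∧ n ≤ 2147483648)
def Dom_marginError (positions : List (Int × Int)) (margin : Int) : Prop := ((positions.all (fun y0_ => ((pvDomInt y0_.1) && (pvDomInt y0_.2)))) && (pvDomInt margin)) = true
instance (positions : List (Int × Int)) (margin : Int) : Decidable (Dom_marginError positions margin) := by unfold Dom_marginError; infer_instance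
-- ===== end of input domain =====

-- B replaces A's repeated front-pop/remove rounds with one forward pass keeping a point
-- iff no kept representative covers it (objective: simpler). Both A and B, for len != 1,
-- empty the caller's list in Python; the equivalence proved here is about the return value.

-- ===== PORT A =====
-- inner while loop of A: scans positions from index j, removing (list.remove = first
-- occurrence, ported as PySem.List.remove?) every point covered by pos and counting
-- removals into i; returns the surviving list and the updated i.  fuel is only a
-- structural totality guard (any fuel > positions.length - j runs the loop to its end).
def marginErrorInner (pos : Int × Int) (margin : Int) (positions : List (Int × Int))
    (i j : Nat) : Nat → List (Int × Int) × Nat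
  | 0 => (positions, i)
  | fuel + 1 =>
    if h : j < positions.length then
      let posRemove := positions[j]
      if pos.1 + margin ≥ posRemove.1 ∧ pos.2 + margin ≥ posRemove.2 then
        match PySem.List.remove? positions posRemove with
        | some l => marginErrorInner pos margin l (i + 1) j fuel
        | none => (positions, i)  -- unreachable: posRemove = positions[j] ∈ positions
      else
        marginErrorInner pos margin positions i (j + 1) fuel
    else
      (positions, i)

-- outer while loop of A: while i < lenInit, take the front element as representative,
-- append it to res, remove it, then run the inner sweep (its fuel rest.length + 1
-- covers the whole sweep).  The outer fuel is again only a totality guard: any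
-- fuel > lenInit - i runs the loop to its end.
def marginErrorOuter (margin : Int) (positions : List (Int × Int)) (lenInit i : Nat)
    (res : List (Int × Int)) : Nat → List (Int × Int)
  | 0 => res
  | fuel + 1 =>
    if i < lenInit then
      match positions with
      | [] => res  -- unreachable in A's reachable states (i < lenInit forces nonempty)
      | pos :: rest =>
        let r := marginErrorInner pos margin rest (i + 1) 0 (rest.length + 1)
        marginErrorOuter margin r.1 lenInit r.2 (res ++ [pos]) fuel
    else
      res

def marginError (positions : List (Int × Int)) (margin : Int) : List (Int × Int) :=
  if positions.length = 1 then positions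
  else marginErrorOuter margin positions positions.length 0 [] (positions.length + 1)

-- ===== PORT B =====
def marginError_alt (positions : List (Int × Int)) (margin : Int) : List (Int × Int) :=
  if positions.length = 1 then positions
  else
    positions.foldl
      (fun res pos =>
        if res.any (fun r => decide (r.1 + margin ≥ pos.1 ∧ r.2 + margin ≥ pos.2)) then res
        else res ++ [pos])
      []

-- ===== PRECONDITION & SPEC =====
def Spec_marginError (positions : List (Int × Int)) (margin : Int) (out : List (Int × Int)) : Prop := out = marginError_alt positions margin
instance (positions : List (Int × Int)) (margin : Int) (out : List (Int × Int)) : Decidable (Spec_marginError positions margin out) := by unfold Spec_marginError; infer_instance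

-- ===== CLAIM (what is proved, stated in full; the proofs are below) =====
def Claim_equal_marginError : Prop := ∀ (positions : List (Int × Int)) (margin : Int), Dom_marginError positions margin → Spec_marginError positions margin (marginError positions margin)

-- ===== LEMMAS AND PROOFS =====

-- x is covered by the representative r (within margin)
def covB (margin : Int) (r x : Int × Int) : Bool :=
  decide (r.1 + margin ≥ x.1 ∧ r.2 + margin ≥ x.2)

-- x survives representative pos
def keepB (margin : Int) (pos x : Int × Int) : Bool := !covB margin pos x

-- abstract form of A's outer loop: take the head, drop everything it covers, recurse
def aPass (margin : Int) : List (Int × Int) → List (Int × Int)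
  | [] => []
  | p :: rest => p :: aPass margin (rest.filter (keepB margin p))
termination_by l => l.length
decreasing_by
  have := List.length_filter_le (keepB margin p) rest
  simp
  omega

-- B's loop body as a named function (marginError_alt's foldl uses exactly this step)
def bStep (margin : Int) (res : List (Int × Int)) (pos : Int × Int) : List (Int × Int) :=
  if res.any (fun r => covB margin r pos) then res else res ++ [pos]

theorem countP_not_add_filter (p : Int × Int → Bool) (l : List (Int × Int)) :
    l.countP (fun a => !p a) + (l.filter p).length = l.length := by
  induction l with
  | nil => simp
  | cons x t ih =>
    by_cases hx : p x = true <;> simp [hx] <;> omega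

-- A's inner while loop over pre ++ suf, scanning at index j = pre.length, where every
-- element of pre has already been tested and kept: it filters suf and counts removals.
theorem inner_spec (pos : Int × Int) (margin : Int) :
    ∀ (fuel : Nat) (suf pre : List (Int × Int)) (i : Nat),
      suf.length < fuel →
      (∀ x ∈ pre, keepB margin pos x = true) →
      marginErrorInner pos margin (pre ++ suf) i pre.length fuel =
        (pre ++ suf.filter (keepB margin pos),
         i + suf.countP (fun x => !keepB margin pos x)) := by
  intro fuel
  induction fuel with
  | zero => intro suf pre i hf _; omega
  | succ fuel ih =>
    intro suf pre i hf hpre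
    cases suf with
    | nil =>
      rw [marginErrorInner]
      simp
    | cons x t =>
      have hj : pre.length < (pre ++ x :: t).length := by simp
      have hx : (pre ++ x :: t)[pre.length]'hj = x := by
        simp [List.getElem_append_right (Nat.le_refl pre.length)]
      have hft : t.length < fuel := by simp at hf; omega
      rw [marginErrorInner]
      simp only [hj, dif_pos, hx]
      by_cases hcov : covB margin pos x = true
      · have hcond : pos.1 + margin ≥ x.1 ∧ pos.2 + margin ≥ x.2 := by
          simpa [covB] using hcov
        have hk : keepB margin pos x = false := by simp [keepB, hcov]
        have hxnp : x ∉ pre := by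
          intro hmem
          have := hpre x hmem
          simp [keepB, hcov] at this
        have hrem : PySem.List.remove? (pre ++ x :: t) x = some (pre ++ t) := by
          have hmem : x ∈ pre ++ x :: t := by simp
          rw [PySem.List.remove?_eq_some_erase _ _ hmem, List.erase_append_right _ hxnp,
            List.erase_cons_head]
        rw [if_pos hcond]
        split
        · next l heq =>
          rw [hrem] at heq
          injection heq with heq
          subst heq
          rw [ih t pre (i + 1) hft hpre]
          simp [hk]
          omega
        · next heq =>
          rw [hrem] at heq
          cases heq
      · have hcond : ¬(pos.1 + margin ≥ x.1 ∧ pos.2 + margin ≥ x.2) := by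
          simpa [covB] using hcov
        have hk : keepB margin pos x = true := by simp [keepB, hcov]
        rw [if_neg hcond]
        have hpre' : ∀ y ∈ pre ++ [x], keepB margin pos y = true := by
          intro y hy
          rcases List.mem_append.1 hy with h1 | h1
          · exact hpre y h1
          · simp at h1; subst h1; exact hk
        have h2 := ih t (pre ++ [x]) i hft hpre'
        rw [show pre ++ x :: t = (pre ++ [x]) ++ t by simp,
          show pre.length + 1 = (pre ++ [x]).length by simp, h2]
        simp [hk]

-- A's outer loop, under its invariant i + |positions| = lenInit and enough fuel,
-- computes res ++ aPass
theorem outer_spec (margin : Int) (lenInit : Nat) :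
    ∀ (fuel : Nat) (positions : List (Int × Int)) (i : Nat) (res : List (Int × Int)),
      positions.length < fuel → i + positions.length = lenInit →
      marginErrorOuter margin positions lenInit i res fuel = res ++ aPass margin positions := by
  intro fuel
  induction fuel with
  | zero => intro positions i res hf _; omega
  | succ fuel IH =>
    intro positions i res hf hinv
    cases positions with
    | nil =>
      rw [marginErrorOuter]
      rw [aPass]
      simp
    | cons pos rest =>
      have h : i < lenInit := by simp at hinv; omega
      rw [marginErrorOuter]
      simp only [h, if_pos]
      have hi := inner_spec pos margin (rest.length + 1) rest [] (i + 1)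
        (by omega) (by simp)
      simp only [List.nil_append, List.length_nil] at hi
      rw [hi]
      have hlt : (rest.filter (keepB margin pos)).length < fuel := by
        have := List.length_filter_le (keepB margin pos) rest
        simp at hf
        omega
      have hinv' : (i + 1 + rest.countP (fun x => !keepB margin pos x)) +
        (rest.filter (keepB margin pos)).length = lenInit := by
        have := countP_not_add_filter (keepB margin pos) rest
        simp at hinv
        omega
      rw [IH _ _ _ hlt hinv']
      rw [aPass]
      simp

-- B-side: a prefix res₁ of representatives covering nothing in l splits off the foldl
theorem bfold_split (margin : Int) :
    ∀ (l res₁ res₂ : List (Int × Int)),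
      (∀ x ∈ l, res₁.any (fun r => covB margin r x) = false) →
      l.foldl (bStep margin) (res₁ ++ res₂) = res₁ ++ l.foldl (bStep margin) res₂ := by
  intro l
  induction l with
  | nil => intro res₁ res₂ _; simp
  | cons x t ih =>
    intro res₁ res₂ hl
    have hx := hl x (by simp)
    simp only [List.foldl_cons]
    have hstep : bStep margin (res₁ ++ res₂) x =
        res₁ ++ bStep margin res₂ x := by
      simp only [bStep, List.any_append, hx, Bool.false_or]
      by_cases h2 : res₂.any (fun r => covB margin r x) = true
      · simp [h2]
      · simp [h2]
    rw [hstep, ih _ _ (fun y hy => hl y (by simp [hy]))]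

-- B-side: once pos ∈ res, every element pos covers is skipped, so filtering them away first changes nothing
theorem bfold_filter (margin : Int) (pos : Int × Int) :
    ∀ (l res : List (Int × Int)), pos ∈ res →
      l.foldl (bStep margin) res = (l.filter (keepB margin pos)).foldl (bStep margin) res := by
  intro l
  induction l with
  | nil => intro res _; simp
  | cons x t ih =>
    intro res hres
    by_cases hk : keepB margin pos x = true
    · simp only [List.filter_cons, hk, if_pos, List.foldl_cons]
      apply ih
      simp only [bStep]
      by_cases h2 : res.any (fun r => covB margin r x) = true
      · simp [h2, hres]
      · simp [h2, hres]
    · have hcov : covB margin pos x = true := by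
        simp [keepB] at hk; exact hk
      have hskip : bStep margin res x = res := by
        simp only [bStep]
        have : res.any (fun r => covB margin r x) = true :=
          List.any_eq_true.2 ⟨pos, hres, hcov⟩
        simp [this]
      simp only [List.filter_cons, hk, if_neg, List.foldl_cons, hskip, Bool.false_eq_true,
        not_false_iff]
      exact ih res hres

-- B's single pass equals A's abstract pass
theorem bfold_eq_aPass (margin : Int) :
    ∀ (n : Nat) (positions : List (Int × Int)), positions.length = n →
      positions.foldl (bStep margin) [] = aPass margin positions := by
  intro n
  induction n using Nat.strong_induction_on with
  | _ n IH =>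
    intro positions hlen
    cases positions with
    | nil => rw [aPass]; simp
    | cons pos rest =>
      rw [aPass]
      simp only [List.foldl_cons]
      have h0 : bStep margin [] pos = [pos] := by simp [bStep]
      rw [h0]
      rw [bfold_filter margin pos rest [pos] (by simp)]
      have hpref : ∀ x ∈ rest.filter (keepB margin pos),
          [pos].any (fun r => covB margin r x) = false := by
        intro x hx
        have := List.of_mem_filter hx
        simp [keepB] at this
        simp [this]
      have := bfold_split margin (rest.filter (keepB margin pos)) [pos] [] hpref
      simp only [List.append_nil] at this
      rw [this]
      have hlt : (rest.filter (keepB margin pos)).length < n := by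
        have := List.length_filter_le (keepB margin pos) rest
        simp at hlen
        omega
      rw [IH _ hlt _ rfl]
      simp

-- marginError_alt, written with the named step function
theorem alt_eq (positions : List (Int × Int)) (margin : Int) :
    marginError_alt positions margin =
      if positions.length = 1 then positions
      else positions.foldl (bStep margin) [] := rfl

-- ===== VERDICT (by name: the statement is the Claim_ definition above) =====
theorem marginError_spec : Claim_equal_marginError := by
  intro positions margin _hdom
  unfold Spec_marginError
  rw [alt_eq, marginError]
  by_cases h1 : positions.length = 1
  · simp [h1]
  · simp only [h1, if_neg, not_false_iff]
    rw [outer_spec margin positions.length (positions.length + 1) positions 0 [] (by omega) (by omega)]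
    rw [bfold_eq_aPass margin positions.length positions rfl]
    simp
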